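-- pv_equiv track=rewrite | github.com/markgsun/adventofcode | src/9b-mirage.py | get_deltas
-- ===== SOURCE A (Python) =====
-- def get_deltas(history_in, deltas_in):
--     deltas = []
--
--     for i in range(len(history_in)-1):
--         deltas += [history_in[i+1] - history_in[i]]
--
--     deltas_out = deltas_in + [deltas]
--
--     if not any(deltas):
--         return deltas_out
--     else:
--         return get_deltas(deltas, deltas_out)
-- ===== SOURCE B (Python) =====
-- def get_deltas(history_in, deltas_in):
--     # Iterative: append each difference row, stop when a row is all zeros.
--     out = list(deltas_in)
--     current = history_in
--     while True:
--         row = [b - a for a, b in zip(current, current[1:])]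
--         out.append(row)
--         if not any(row):
--             return out
--         current = row
-- ===== Notes on version B (the rewrite author's own statement) =====
-- stated objective: simpler
-- what changed: Replaces accumulator-passing recursion with an index loop by a plain iterative while-loop whose difference row is a zip comprehension over adjacent pairs.
import Mathlib
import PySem

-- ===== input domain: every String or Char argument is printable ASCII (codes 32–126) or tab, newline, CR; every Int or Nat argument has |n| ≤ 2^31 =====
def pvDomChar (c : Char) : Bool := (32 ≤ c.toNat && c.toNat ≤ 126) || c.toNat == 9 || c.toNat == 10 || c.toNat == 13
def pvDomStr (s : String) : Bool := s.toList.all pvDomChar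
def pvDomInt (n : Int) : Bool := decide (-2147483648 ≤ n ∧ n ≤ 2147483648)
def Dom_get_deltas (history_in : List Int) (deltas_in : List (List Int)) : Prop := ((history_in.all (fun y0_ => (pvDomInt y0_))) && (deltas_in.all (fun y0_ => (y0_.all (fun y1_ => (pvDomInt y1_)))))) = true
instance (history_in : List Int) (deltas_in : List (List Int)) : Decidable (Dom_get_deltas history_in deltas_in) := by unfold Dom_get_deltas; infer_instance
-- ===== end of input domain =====

-- B replaces A's accumulator-passing recursion (with an index loop building each row)
-- by a plain iterative loop whose difference row is a zip over adjacent pairs; same cost.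

-- ===== PORT A =====
-- the 'for i in range(len(history_in)-1): deltas += [history_in[i+1] - history_in[i]]' loop;
-- both indices are always in range (0 ≤ i < i+1 ≤ len-1), so pyGetD is exact here.
def rowA (h : List Int) : List Int :=
  (PySem.List.pyRange 0 ((h.length : Int) - 1) 1).foldl
    (fun acc i => acc ++ [PySem.List.pyGetD h (i + 1) 0 - PySem.List.pyGetD h i 0]) []

-- termination fact for A's recursion, cited by name in decreasing_by
theorem rowA_length (h : List Int) : (rowA h).length = h.length - 1 := by
  simp only [rowA, PySem.List.foldl_append_singleton_eq_map, List.nil_append, List.length_map,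
    PySem.List.length_pyRange_one]
  omega

def get_deltas (history_in : List Int) (deltas_in : List (List Int)) : List (List Int) :=
  let deltas := rowA history_in
  let deltas_out := deltas_in ++ [deltas]
  -- 'if not any(deltas): return deltas_out  else: return get_deltas(deltas, deltas_out)'
  if deltas.any (fun d => d != 0) then get_deltas deltas deltas_out else deltas_out
termination_by history_in.length
decreasing_by
  rename_i hany
  have hany' : ((rowA history_in).any fun d => d != 0) = true := hany
  have hlen := rowA_length history_in
  have hne : rowA history_in ≠ [] := by
    intro hnil; rw [hnil] at hany'; simp at hany'
  have : 0 < (rowA history_in).length := List.length_pos_of_ne_nil hne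
  omega

-- ===== PORT B =====
-- 'row = [b - a for a, b in zip(current, current[1:])]'  (current[1:] = drop 1, exact)
def diffRow (xs : List Int) : List Int :=
  List.zipWith (fun a b => b - a) xs (xs.drop 1)

theorem diffRow_length (xs : List Int) : (diffRow xs).length = xs.length - 1 := by
  simp [diffRow]

-- the 'while True' loop of B, state (current, out)
def altLoop (current : List Int) (out : List (List Int)) : List (List Int) :=
  let row := diffRow current
  let out' := out ++ [row]
  if row.any (fun d => d != 0) then altLoop row out' else out'
termination_by current.length
decreasing_by
  rename_i hany
  have hany' : ((diffRow current).any fun d => d != 0) = true := hany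
  have hlen := diffRow_length current
  have hne : diffRow current ≠ [] := by
    intro hnil; rw [hnil] at hany'; simp at hany'
  have : 0 < (diffRow current).length := List.length_pos_of_ne_nil hne
  omega

def get_deltas_alt (history_in : List Int) (deltas_in : List (List Int)) : List (List Int) :=
  altLoop history_in deltas_in

-- ===== PRECONDITION & SPEC =====
def Spec_get_deltas (history_in : List Int) (deltas_in : List (List Int)) (out : List (List Int)) : Prop := out = get_deltas_alt history_in deltas_in
instance (history_in : List Int) (deltas_in : List (List Int)) (out : List (List Int)) : Decidable (Spec_get_deltas history_in deltas_in out) := by unfold Spec_get_deltas; infer_instance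

-- ===== CLAIM (what is proved, stated in full; the proofs are below) =====
def Claim_equal_get_deltas : Prop := ∀ (history_in : List Int) (deltas_in : List (List Int)), Dom_get_deltas history_in deltas_in → Spec_get_deltas history_in deltas_in (get_deltas history_in deltas_in)

-- ===== LEMMAS AND PROOFS =====

-- A's index-loop row equals B's zip row
theorem rowA_eq_diffRow (h : List Int) : rowA h = diffRow h := by
  apply List.ext_getElem
  · rw [rowA_length, diffRow_length]
  · intro k hk1 hk2
    rw [rowA_length] at hk1
    have hlt : k + 1 < h.length := by omega
    have hk0 : k < h.length := by omega
    simp only [rowA, PySem.List.foldl_append_singleton_eq_map, List.nil_append,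
      PySem.List.pyRange_one, List.map_map, diffRow, List.getElem_zipWith,
      List.getElem_map, List.getElem_range, Function.comp, zero_add]
    rw [show ((k:Int) + 1) = ((k + 1 : Nat) : Int) by push_cast; ring]
    simp only [PySem.List.pyGetD_natCast]
    simp [List.getD_eq_getElem?_getD, hlt, hk0]

theorem get_deltas_eq_altLoop (h : List Int) (out : List (List Int)) :
    get_deltas h out = altLoop h out := by
  unfold get_deltas altLoop
  simp only [rowA_eq_diffRow]
  split
  · exact get_deltas_eq_altLoop _ _
  · rfl
termination_by h.length
decreasing_by
  rename_i hany
  have hne : diffRow h ≠ [] := by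
    intro hnil; rw [hnil] at hany; simp at hany
  have hlen := diffRow_length h
  have : 0 < (diffRow h).length := List.length_pos_of_ne_nil hne
  omega

-- ===== VERDICT (by name: the statement is the Claim_ definition above) =====
theorem get_deltas_spec : Claim_equal_get_deltas := by
  intro h d _
  exact get_deltas_eq_altLoop h d
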